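-- pv_equiv track=rewrite | github.com/ApeWorX/ape-vyper | ape_vyper/interface.py | extract_meta
-- ===== SOURCE A (Python) =====
-- from typing import TYPE_CHECKING, Any, Optional, Union
--
-- def extract_meta(source_code: str) -> tuple[Optional[str], str]:
--     """Extract version pragma, and return cleaned source"""
--     version_pragma: Optional[str] = None
--     cleaned_source_lines: list[str] = []
--
--     """
--     Pragma format changed a bit.
--
--     >= 3.10: #pragma version ^0.3.0
--     < 3.10: # @version ^0.3.0
--
--     Both are valid until 0.4 where the latter may be deprecated
--     """
--     for line in source_code.splitlines():
--         if line.startswith("#") and (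
--             ("pragma version" in line or "@version" in line) and version_pragma is None
--         ):
--             version_pragma = line
--         else:
--             cleaned_source_lines.append(line)
--
--     return (version_pragma, "\n".join(cleaned_source_lines))
-- ===== SOURCE B (Python) =====
-- def extract_meta(source_code: str):
--     """Extract version pragma, and return cleaned source"""
--     lines = source_code.splitlines()
--     idx = next(
--         (i for i, line in enumerate(lines)
--          if line.startswith("#") and ("pragma version" in line or "@version" in line)),
--         None,
--     )
--     version_pragma = lines[idx] if idx is not None else None
--     cleaned = [line for i, line in enumerate(lines) if i != idx]
--     return (version_pragma, "\n".join(cleaned))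
-- ===== Notes on version B (the rewrite author's own statement) =====
-- stated objective: alternative
-- what changed: Replaces A's single stateful loop (conditional accumulate with an Optional flag) by a find-first-matching-index pass followed by an index-filter pass over enumerate.
import Mathlib
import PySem

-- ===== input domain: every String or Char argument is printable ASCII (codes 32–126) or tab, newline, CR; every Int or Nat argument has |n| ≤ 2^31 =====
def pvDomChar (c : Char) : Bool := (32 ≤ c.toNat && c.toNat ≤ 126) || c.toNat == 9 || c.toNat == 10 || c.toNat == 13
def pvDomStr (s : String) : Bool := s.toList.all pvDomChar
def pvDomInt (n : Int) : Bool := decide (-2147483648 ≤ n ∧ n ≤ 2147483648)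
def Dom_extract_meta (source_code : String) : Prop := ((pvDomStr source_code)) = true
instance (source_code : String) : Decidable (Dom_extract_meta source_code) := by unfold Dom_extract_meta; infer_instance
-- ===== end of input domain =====

-- B replaces A's single conditional-accumulate loop by a find-first-index pass plus an
-- index-filter pass (a different decomposition of the same O(n) task).

-- ===== PORT A =====
def extract_meta (source_code : String) : Option String × String :=
  let r := (PySem.Str.splitlines source_code).foldl
    (fun (st : Option String × List String) (line : String) =>
      if PySem.Str.startswith line "#" &&
         ((PySem.Str.isIn "pragma version" line || PySem.Str.isIn "@version" line) && st.1.isNone)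
      then (some line, st.2)
      else (st.1, st.2 ++ [line])) (none, [])
  (r.1, PySem.Str.join "\n" r.2)

-- ===== PORT B =====
def pragmaLine (line : String) : Bool :=
  PySem.Str.startswith line "#" &&
    (PySem.Str.isIn "pragma version" line || PySem.Str.isIn "@version" line)

def extract_meta_alt (source_code : String) : Option String × String :=
  let lines := PySem.Str.splitlines source_code
  let idx? : Option Int :=
    ((PySem.List.enumerate lines).find? (fun p => pragmaLine p.2)).map (·.1)
  let version_pragma : Option String := idx?.bind (fun i => PySem.List.pyGet? lines i)
  let cleaned := ((PySem.List.enumerate lines).filter (fun p => some p.1 != idx?)).map (·.2)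
  (version_pragma, PySem.Str.join "\n" cleaned)

-- ===== PRECONDITION & SPEC =====
def Spec_extract_meta (source_code : String) (out : Option String × String) : Prop := out = extract_meta_alt source_code
instance (source_code : String) (out : Option String × String) : Decidable (Spec_extract_meta source_code out) := by unfold Spec_extract_meta; infer_instance

-- ===== CLAIM (what is proved, stated in full; the proofs are below) =====
def Claim_equal_extract_meta : Prop := ∀ (source_code : String), Dom_extract_meta source_code → Spec_extract_meta source_code (extract_meta source_code)

-- ===== LEMMAS AND PROOFS =====

-- A's loop body, named for stable rewriting.
def stepA (st : Option String × List String) (line : String) : Option String × List String :=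
  if PySem.Str.startswith line "#" &&
     ((PySem.Str.isIn "pragma version" line || PySem.Str.isIn "@version" line) && st.1.isNone)
  then (some line, st.2)
  else (st.1, st.2 ++ [line])

lemma stepA_some (v : String) (acc : List String) (line : String) :
    stepA (some v, acc) line = (some v, acc ++ [line]) := by
  simp [stepA]

lemma stepA_none_pos (acc : List String) (line : String) (h : pragmaLine line = true) :
    stepA (none, acc) line = (some line, acc) := by
  unfold pragmaLine at h
  simp only [stepA, Option.isNone_none, Bool.and_true, h, reduceIte]

lemma stepA_none_neg (acc : List String) (line : String) (h : pragmaLine line = false) :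
    stepA (none, acc) line = (none, acc ++ [line]) := by
  unfold pragmaLine at h
  simp only [stepA, Option.isNone_none, Bool.and_true, h, Bool.false_eq_true, reduceIte]

-- once a pragma has been recorded, A's loop only appends.
lemma foldA_some (lines : List String) (v : String) (acc : List String) :
    lines.foldl stepA (some v, acc) = (some v, acc ++ lines) := by
  induction lines generalizing acc with
  | nil => simp
  | cons l rest ih => rw [List.foldl_cons, stepA_some, ih]; simp

-- A's loop from the initial state, characterised by the first matching index.
lemma foldA_none (lines : List String) (acc : List String) :
    lines.foldl stepA (none, acc) =
      (if h : lines.findIdx pragmaLine < lines.length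
       then (some (lines[lines.findIdx pragmaLine]), acc ++ lines.eraseIdx (lines.findIdx pragmaLine))
       else (none, acc ++ lines)) := by
  induction lines generalizing acc with
  | nil => simp
  | cons l rest ih =>
    by_cases hp : pragmaLine l
    · rw [List.foldl_cons, stepA_none_pos _ _ hp, foldA_some]
      rw [dif_pos (by simp [List.findIdx_cons, hp])]
      simp [List.findIdx_cons, hp]
    · have hp' : pragmaLine l = false := by simpa using hp
      rw [List.foldl_cons, stepA_none_neg _ _ hp', ih]
      by_cases h : rest.findIdx pragmaLine < rest.length
      · rw [dif_pos h, dif_pos (by simp only [List.findIdx_cons, hp', cond_false, List.length_cons]; omega)]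
        simp [List.findIdx_cons, hp', List.eraseIdx_cons_succ]
      · rw [dif_neg h, dif_neg (by simp only [List.findIdx_cons, hp', cond_false, List.length_cons]; omega)]
        simp

-- find? over enumerate, by the first matching index.
lemma find_enumerate (lines : List String) (s : Int) :
    (PySem.List.enumerate lines s).find? (fun p => pragmaLine p.2) =
      (if h : lines.findIdx pragmaLine < lines.length
       then some (s + lines.findIdx pragmaLine, lines[lines.findIdx pragmaLine])
       else none) := by
  induction lines generalizing s with
  | nil => simp [PySem.List.enumerate_nil]
  | cons l rest ih =>
    by_cases hp : pragmaLine l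
    · rw [PySem.List.enumerate_cons, List.find?_cons_of_pos (by simpa using hp)]
      rw [dif_pos (by simp [List.findIdx_cons, hp])]
      simp [List.findIdx_cons, hp]
    · have hp' : pragmaLine l = false := by simpa using hp
      rw [PySem.List.enumerate_cons, List.find?_cons_of_neg (by simpa using hp), ih (s + 1)]
      by_cases h : rest.findIdx pragmaLine < rest.length
      · rw [dif_pos h, dif_pos (by simp only [List.findIdx_cons, hp', cond_false, List.length_cons]; omega)]
        simp only [List.findIdx_cons, hp', cond_false, Option.some.injEq, Prod.mk.injEq]
        exact ⟨by omega, by simp⟩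
      · rw [dif_neg h, dif_neg (by simp only [List.findIdx_cons, hp', cond_false, List.length_cons]; omega)]

-- filtering out one too-small index keeps everything.
lemma filter_keep (lines : List String) (s t : Int) (h : t < s) :
    ((PySem.List.enumerate lines s).filter (fun p => !(p.1 == t))).map (·.2) = lines := by
  induction lines generalizing s with
  | nil => simp [PySem.List.enumerate_nil]
  | cons l rest ih =>
    rw [PySem.List.enumerate_cons, List.filter_cons_of_pos (by simp; omega)]
    simp [ih (s + 1) (by omega)]

-- filtering out index s + j from enumerate erases position j.
lemma filter_erase (lines : List String) (s : Int) (j : Nat) :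
    ((PySem.List.enumerate lines s).filter (fun p => !(p.1 == s + (j : Int)))).map (·.2) =
      lines.eraseIdx j := by
  induction lines generalizing s j with
  | nil => simp [PySem.List.enumerate_nil]
  | cons l rest ih =>
    cases j with
    | zero =>
      rw [PySem.List.enumerate_cons, List.filter_cons_of_neg (by simp)]
      simpa using filter_keep rest (s + 1) s (by omega)
    | succ k =>
      rw [PySem.List.enumerate_cons, List.filter_cons_of_pos (by simp; push_cast; omega)]
      have hk := ih (s + 1) k
      rw [show s + ((k : Nat) + 1 : Nat) = (s + 1) + (k : Int) by push_cast; ring]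
      simp only [List.map_cons, List.eraseIdx_cons_succ, hk]

-- ===== VERDICT (by name: the statement is the Claim_ definition above) =====
theorem extract_meta_spec : Claim_equal_extract_meta := by
  intro source_code _
  unfold Spec_extract_meta
  have ha : extract_meta source_code =
      (let r := (PySem.Str.splitlines source_code).foldl stepA (none, []);
       (r.1, PySem.Str.join "\n" r.2)) := rfl
  have halt : extract_meta_alt source_code =
      (((((PySem.List.enumerate (PySem.Str.splitlines source_code)).find?
            (fun p => pragmaLine p.2)).map (·.1)).bind
          (fun i => PySem.List.pyGet? (PySem.Str.splitlines source_code) i)),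
       PySem.Str.join "\n"
         (((PySem.List.enumerate (PySem.Str.splitlines source_code)).filter
             (fun p => some p.1 !=
               ((PySem.List.enumerate (PySem.Str.splitlines source_code)).find?
                 (fun p => pragmaLine p.2)).map (·.1))).map (·.2))) := rfl
  rw [ha, halt]
  set lines := PySem.Str.splitlines source_code with hl
  rw [foldA_none, find_enumerate lines 0]
  by_cases h : lines.findIdx pragmaLine < lines.length
  · simp only [dif_pos h]
    have hg : PySem.List.pyGet? lines ((0 : Int) + (lines.findIdx pragmaLine : Int)) =
        some (lines[lines.findIdx pragmaLine]) := by
      rw [zero_add, PySem.List.pyGet?_natCast]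
      simp [h]
    have hf := filter_erase lines 0 (lines.findIdx pragmaLine)
    simp only [Option.map_some, Option.bind_some, hg]
    refine Prod.ext rfl ?_
    simp only [List.nil_append]
    rw [← hf]
    rfl
  · simp only [dif_neg h, Option.map_none]
    refine Prod.ext rfl ?_
    simp only [List.nil_append]
    congr 1
    have : ∀ p : Int × String, (some p.1 != (none : Option Int)) = true := by intro p; rfl
    rw [List.filter_eq_self.mpr (fun p _ => this p)]
    exact (PySem.List.map_snd_enumerate lines 0).symm
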